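-- pv_equiv track=rewrite | github.com/Potewo/LEDCUBE | LEDCUBEsimulator.py | make_axes_list
-- ===== SOURCE A (Python) =====
-- LED_VALUE = 8
--
-- def make_axes_list(value):
--     axes = list()
--     for i in range(LED_VALUE):
--         axes.append(list())
--         for ii in range(LED_VALUE):
--             for iii in range(LED_VALUE):
--                 if value == "1x":
--                     axes[i].append(ii + 1)
--                 if value == "2":
--                     axes[i].append(0)
--                 if value == "1y":
--                     axes[i].append(iii + 1)
--                 if value == "1z":
--                     axes[i].append(i + 1)
--
--     return axes
-- ===== SOURCE B (Python) =====
-- def make_axes_list(value):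
--     if value == "2":
--         return [[0] * 64 for _ in range(8)]
--     if value == "1z":
--         return [[i + 1] * 64 for i in range(8)]
--     if value == "1x":
--         return [[v for v in range(1, 9) for _ in range(8)] for _ in range(8)]
--     if value == "1y":
--         return [list(range(1, 9)) * 8 for _ in range(8)]
--     return [[] for _ in range(8)]
-- ===== Notes on version B (the rewrite author's own statement) =====
-- stated objective: simpler
-- what changed: Branches on value once up front and returns each 8-row table by a closed-form comprehension (replication/ranges) instead of three nested loops re-testing value 4 times per cell.
import Mathlib
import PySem

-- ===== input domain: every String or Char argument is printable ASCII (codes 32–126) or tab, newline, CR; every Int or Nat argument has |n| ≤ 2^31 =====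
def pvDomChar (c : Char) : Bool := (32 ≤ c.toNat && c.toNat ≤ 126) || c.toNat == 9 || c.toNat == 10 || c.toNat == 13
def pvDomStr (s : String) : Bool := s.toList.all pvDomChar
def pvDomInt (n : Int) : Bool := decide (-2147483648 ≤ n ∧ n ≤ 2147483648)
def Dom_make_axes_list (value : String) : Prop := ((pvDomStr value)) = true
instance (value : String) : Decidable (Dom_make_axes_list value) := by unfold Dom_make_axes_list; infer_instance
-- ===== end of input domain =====

set_option maxRecDepth 4000


-- B branches on value once and builds each row by a closed form; same return value, simpler.
-- ===== PORT A =====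
def make_axes_list (value : String) : List (List Int) :=
  (PySem.List.pyRange 0 8 1).foldl (fun axes i =>
    let row : List Int := []
    let row := (PySem.List.pyRange 0 8 1).foldl (fun row ii =>
      (PySem.List.pyRange 0 8 1).foldl (fun row iii =>
        let row := if value = "1x" then row ++ [ii + 1] else row
        let row := if value = "2" then row ++ [(0 : Int)] else row
        let row := if value = "1y" then row ++ [iii + 1] else row
        let row := if value = "1z" then row ++ [i + 1] else row
        row) row) row
    axes ++ [row]) []

-- ===== PORT B =====
def make_axes_list_alt (value : String) : List (List Int) :=
  if value = "2" then
    List.replicate 8 (List.replicate 64 (0 : Int))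
  else if value = "1z" then
    (List.range 8).map (fun i => List.replicate 64 ((i : Int) + 1))
  else if value = "1x" then
    List.replicate 8 ((List.range 8).flatMap (fun v => List.replicate 8 ((v : Int) + 1)))
  else if value = "1y" then
    List.replicate 8 ((List.replicate 8 ((List.range 8).map (fun v => (v : Int) + 1))).flatten)
  else
    List.replicate 8 []

-- ===== PRECONDITION & SPEC =====
def Spec_make_axes_list (value : String) (out : List (List Int)) : Prop := out = make_axes_list_alt value
instance (value : String) (out : List (List Int)) : Decidable (Spec_make_axes_list value out) := by unfold Spec_make_axes_list; infer_instance

-- ===== CLAIM (what is proved, stated in full; the proofs are below) =====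
def Claim_equal_make_axes_list : Prop := ∀ (value : String), Dom_make_axes_list value → Spec_make_axes_list value (make_axes_list value)

-- ===== LEMMAS AND PROOFS =====

-- ===== VERDICT (by name: the statement is the Claim_ definition above) =====
theorem make_axes_list_spec : Claim_equal_make_axes_list := by
  intro value _
  unfold Spec_make_axes_list
  by_cases h2 : value = "2"
  · subst h2; decide
  · by_cases hz : value = "1z"
    · subst hz; decide
    · by_cases hx : value = "1x"
      · subst hx; decide
      · by_cases hy : value = "1y"
        · subst hy; decide
        · simp [make_axes_list, make_axes_list_alt, h2, hz, hx, hy, PySem.List.pyRange]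
          decide
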